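-- pv_equiv track=rewrite | github.com/AlexVHub/Python_Learning | Шифр Цезаря на длину слова.py | crypto
-- ===== SOURCE A (Python) =====
-- en_lower = 'abcdefghijklmnopqrstuvwxyz'
--
-- en_upper = en_lower.upper()
--
-- def crypto(string):
--     string_out = ''
--     count = 0
--     n = 0
--     for i in range(len(string)):
--         if string[i].isalpha() == True:
--             count += 1
--             continue
--         else:
--             for k in string[n:i]:
--                 if k == k.upper():
--                     j = en_upper.find(k)
--                     if j != -1:
--                         j = (j + count) % 26
--                         string_out += en_upper[j]
--                 else:
--                     j = en_lower.find(k)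
--                     if j != -1:
--                         j = (j + count) % 26
--                         string_out += en_lower[j]
--             string_out += string[i]
--         count = 0
--         n = i + 1
--     return string_out[:-1]
-- ===== SOURCE B (Python) =====
-- def crypto(string):
--     # Stage 1: parse the text into delimiter-terminated words: each non-alphabetic
--     # character closes the word accumulated before it.
--     words, delims, cur = [], [], []
--     for ch in string:
--         if ch.isalpha():
--             cur.append(ch)
--         else:
--             words.append(cur)
--             delims.append(ch)
--             cur = []
--
--     # Stage 2: Caesar-shift a word by its own length.
--     def shift(word):
--         k = len(word)
--         return ''.join(chr((ord(c) - base + k) % 26 + base)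
--                        for c in word
--                        for base in ([65] if c.isupper() else [97]))
--
--     # Stage 3: join the shifted words, interposing each word's closing delimiter
--     # between consecutive words.
--     shifted = [shift(w) for w in words]
--     if not shifted:
--         return ''
--     return shifted[0] + ''.join(d + s for d, s in zip(delims, shifted[1:]))
-- ===== Notes on version B (the rewrite author's own statement) =====
-- stated objective: alternative
-- what changed: A is a one-pass per-index state machine that re-slices the string at every non-alphabetic character, emits output as it goes and finally chops the last character with [:-1]; B is a three-stage pipeline: parse the text into delimiter-terminated words, Caesar-shift each word by its own length via ord/chr arithmetic, then join the shifted words with their closing delimiters interposed between consecutive words (no trailing chop).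
import Mathlib
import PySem

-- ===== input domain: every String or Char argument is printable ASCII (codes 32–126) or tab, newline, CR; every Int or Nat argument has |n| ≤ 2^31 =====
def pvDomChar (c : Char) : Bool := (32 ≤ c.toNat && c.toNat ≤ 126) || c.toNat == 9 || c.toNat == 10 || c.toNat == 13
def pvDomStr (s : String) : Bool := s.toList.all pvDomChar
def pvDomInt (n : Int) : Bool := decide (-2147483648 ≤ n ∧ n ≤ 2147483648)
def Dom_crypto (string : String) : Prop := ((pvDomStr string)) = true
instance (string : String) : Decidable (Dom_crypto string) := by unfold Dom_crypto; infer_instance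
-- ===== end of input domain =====

-- B replaces A's emit-as-you-go per-index state machine (run counter, slice start, final [:-1])
-- with a staged pipeline: parse into delimiter-terminated words, shift each word by its length,
-- join with the delimiters interposed; same values, alternative decomposition.

-- ===== PORT A =====
def enLower : List Char := "abcdefghijklmnopqrstuvwxyz".toList

def enUpper : List Char := PySem.Chars.upper enLower

-- body of A's inner 'for k in string[n:i]' loop
def cryptoInner (count : Int) (out : List Char) (k : Char) : List Char :=
  if k == PySem.Chars.upperChar k then
    let j := PySem.Chars.find enUpper [k]
    if j ≠ -1 then out ++ [PySem.List.pyGetD enUpper (PySem.Int.mod (j + count) 26) 'a'] else out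
  else
    let j := PySem.Chars.find enLower [k]
    if j ≠ -1 then out ++ [PySem.List.pyGetD enLower (PySem.Int.mod (j + count) 26) 'a'] else out

-- body of A's outer 'for i in range(len(string))' loop; state = (string_out, count, n)
def cryptoStep (cs : List Char) (st : List Char × Int × Int) (i : Int) : List Char × Int × Int :=
  let (out, count, n) := st
  if PySem.Chars.isalpha (PySem.List.pyGetD cs i ' ') then
    (out, count + 1, n)
  else
    let out := (PySem.List.slice cs (some n) (some i)).foldl (cryptoInner count) out
    (out ++ [PySem.List.pyGetD cs i ' '], 0, i + 1)

def crypto (string : String) : String :=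
  let cs := string.toList
  let st := (PySem.List.pyRange 0 (PySem.Str.len string) 1).foldl (cryptoStep cs) ([], 0, 0)
  String.ofList (PySem.List.slice st.1 none (some (-1)))

-- ===== PORT B =====
-- stage-1 parsing step: each non-alphabetic character closes the accumulated word
def parseStep (st : List (List Char) × List Char × List Char) (ch : Char) :
    List (List Char) × List Char × List Char :=
  let (words, delims, cur) := st
  if PySem.Chars.isalpha ch then (words, delims, cur ++ [ch])
  else (words ++ [cur], delims ++ [ch], [])

-- stage-2: shift one character of a word of length k (base 65 upper, 97 lower)
def shiftChar (k : Int) (c : Char) : Char :=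
  let base : Int := if PySem.Chars.isupper c then 65 else 97
  Char.ofNat (PySem.Int.mod ((c.toNat : Int) - base + k) 26 + base).toNat

def shiftWord (w : List Char) : List Char := w.map (shiftChar (w.length : Int))

-- stage-3 join: first shifted word, then delimiter+word for each later word
def joinWords (delims : List Char) : List (List Char) → List Char
  | [] => []
  | s0 :: rest => s0 ++ (delims.zip rest).flatMap (fun p => p.1 :: p.2)

def crypto_alt (string : String) : String :=
  let st := string.toList.foldl parseStep ([], [], [])
  String.ofList (joinWords st.2.1 (st.1.map shiftWord))

-- ===== PRECONDITION & SPEC =====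
def Spec_crypto (string : String) (out : String) : Prop := out = crypto_alt string
instance (string : String) (out : String) : Decidable (Spec_crypto string out) := by unfold Spec_crypto; infer_instance

-- ===== CLAIM (what is proved, stated in full; the proofs are below) =====
def Claim_equal_crypto : Prop := ∀ (string : String), Dom_crypto string → Spec_crypto string (crypto string)

-- ===== LEMMAS AND PROOFS =====

-- recursive characterisation of B's stage-1 foldl
def parseF (cur : List Char) : List Char → List (List Char) × List Char × List Char
  | [] => ([], [], cur)
  | c :: rest =>
    if PySem.Chars.isalpha c then parseF (cur ++ [c]) rest
    else
      let t := parseF [] rest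
      (cur :: t.1, c :: t.2.1, t.2.2)

-- fused parse + shift + full emission (each word followed by its delimiter)
def emitP (cur : List Char) : List Char → List Char
  | [] => []
  | c :: rest =>
    if PySem.Chars.isalpha c then emitP (cur ++ [c]) rest
    else shiftWord cur ++ c :: emitP [] rest

def emitWD : List (List Char) → List Char → List Char
  | [], _ => []
  | _, [] => []
  | w :: ws, d :: ds => shiftWord w ++ d :: emitWD ws ds

theorem getD_append_cons (pre t : List Char) (c d : Char) :
    (pre ++ c :: t).getD pre.length d = c := by
  simp [List.getD]

theorem find_upper_ofNat (n : Nat) (h1 : 65 ≤ n) (h2 : n ≤ 90) :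
    PySem.Chars.find enUpper [Char.ofNat n] = (n : Int) - 65 := by
  interval_cases n <;> decide

theorem find_lower_ofNat (n : Nat) (h1 : 97 ≤ n) (h2 : n ≤ 122) :
    PySem.Chars.find enLower [Char.ofNat n] = (n : Int) - 97 := by
  interval_cases n <;> decide

theorem getD_enUpper (m : Nat) (h : m < 26) : enUpper.getD m 'a' = Char.ofNat (65 + m) := by
  interval_cases m <;> decide

theorem getD_enLower (m : Nat) (h : m < 26) : enLower.getD m 'a' = Char.ofNat (97 + m) := by
  interval_cases m <;> decide

theorem pyGetD_emod26 (xs : List Char) (a : Int) (d : Char) (h : xs.length = 26) :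
    PySem.List.pyGetD xs (a % 26) d = xs.getD (a % 26).toNat d := by
  rw [PySem.List.pyGetD_eq_getElem xs d (Int.emod_nonneg _ (by norm_num))
        (by rw [h]; exact_mod_cast Int.emod_lt_of_pos _ (by norm_num)),
      ← List.getD_eq_getElem]

theorem cryptoInner_alpha (count : Int) (out : List Char) (k : Char)
    (h : PySem.Chars.isalpha k = true) :
    cryptoInner count out k = out ++ [shiftChar count k] := by
  simp only [PySem.Chars.isalpha, Bool.or_eq_true] at h
  unfold cryptoInner shiftChar
  rcases h with h | h
  · -- uppercase
    simp only [PySem.Chars.isupper, Bool.and_eq_true, decide_eq_true_eq] at h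
    obtain ⟨h1, h2⟩ := h
    have hn1 : 65 ≤ k.toNat := h1
    have hn2 : k.toNat ≤ 90 := h2
    have hup : PySem.Chars.upperChar k = k := by
      simp only [PySem.Chars.upperChar, PySem.Chars.islower]
      have : ¬ ('a' ≤ k) := by
        intro hc
        have : 97 ≤ k.toNat := hc
        omega
      simp [this]
    rw [hup]
    have hfind : PySem.Chars.find enUpper [k] = (k.toNat : Int) - 65 := by
      have := find_upper_ofNat k.toNat hn1 hn2
      rwa [Char.ofNat_toNat] at this
    have hisup : PySem.Chars.isupper k = true := by
      simp [PySem.Chars.isupper, h1, h2]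
    simp only [beq_self_eq_true, if_true, hfind, hisup]
    have hne : ((k.toNat : Int) - 65 ≠ -1) := by omega
    simp only [hne, if_true, ne_eq, not_false_eq_true]
    rw [PySem.Int.mod_eq_emod_of_pos (by norm_num)]
    rw [pyGetD_emod26 enUpper _ 'a' (by decide)]
    rw [getD_enUpper ((((k.toNat:Int) - 65 + count) % 26).toNat) (by omega)]
    rw [show 65 + ((((k.toNat:Int) - 65 + count) % 26).toNat)
          = (((k.toNat:Int) - 65 + count) % 26 + 65).toNat from by omega]
  · -- lowercase
    simp only [PySem.Chars.islower, Bool.and_eq_true, decide_eq_true_eq] at h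
    obtain ⟨h1, h2⟩ := h
    have hn1 : 97 ≤ k.toNat := h1
    have hn2 : k.toNat ≤ 122 := h2
    have hlow : PySem.Chars.islower k = true := by
      simp [PySem.Chars.islower, h1, h2]
    have hup : (k == PySem.Chars.upperChar k) = false := by
      simp only [PySem.Chars.upperChar, hlow, if_true]
      rw [beq_eq_false_iff_ne]
      intro hc
      have := congrArg Char.toNat hc
      rw [Char.toNat_ofNat, if_pos (Or.inl (by omega))] at this
      omega
    rw [hup]
    have hfind : PySem.Chars.find enLower [k] = (k.toNat : Int) - 97 := by
      have := find_lower_ofNat k.toNat hn1 hn2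
      rwa [Char.ofNat_toNat] at this
    have hisup : PySem.Chars.isupper k = false := by
      simp only [PySem.Chars.isupper]
      have : ¬ (k ≤ 'Z') := by
        intro hc
        have : k.toNat ≤ 90 := hc
        omega
      simp [this]
    simp only [Bool.false_eq_true, if_false, hfind, hisup]
    have hne : ((k.toNat : Int) - 97 ≠ -1) := by omega
    simp only [hne, if_true, ne_eq, not_false_eq_true]
    rw [PySem.Int.mod_eq_emod_of_pos (by norm_num)]
    rw [pyGetD_emod26 enLower _ 'a' (by decide)]
    rw [getD_enLower ((((k.toNat:Int) - 97 + count) % 26).toNat) (by omega)]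
    rw [show 97 + ((((k.toNat:Int) - 97 + count) % 26).toNat)
          = (((k.toNat:Int) - 97 + count) % 26 + 97).toNat from by omega]

theorem foldl_cryptoInner (run : List Char) (count : Int) (out : List Char)
    (h : ∀ c ∈ run, PySem.Chars.isalpha c = true) :
    run.foldl (cryptoInner count) out = out ++ run.map (shiftChar count) := by
  induction run generalizing out with
  | nil => simp
  | cons c cs ih =>
    simp only [List.foldl_cons, List.map_cons]
    rw [cryptoInner_alpha count out c (h c (by simp)), ih _ (fun x hx => h x (by simp [hx]))]
    simp

-- A's fold computes (out ++) the fused emission of the pending run and the remaining suffix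
theorem crypto_inv : ∀ (suf pre0 cur out : List Char),
    (∀ x ∈ cur, PySem.Chars.isalpha x = true) →
    ((PySem.List.pyRange (((pre0 ++ cur).length : Nat) : Int)
        (((pre0 ++ cur ++ suf).length : Nat) : Int) 1).foldl
      (cryptoStep (pre0 ++ cur ++ suf)) (out, ((cur.length : Nat) : Int), ((pre0.length : Nat) : Int))).1
      = out ++ emitP cur suf := by
  intro suf
  induction suf with
  | nil =>
    intro pre0 cur out _
    rw [show (((pre0 ++ cur ++ ([] : List Char)).length : Nat) : Int)
          = (((pre0 ++ cur).length : Nat) : Int) from by simp,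
        PySem.List.pyRange_one_eq_nil le_rfl]
    simp [emitP]
  | cons c rest ih =>
    intro pre0 cur out hcur
    have hget : PySem.List.pyGetD (pre0 ++ cur ++ (c :: rest)) (((pre0 ++ cur).length : Nat) : Int) ' ' = c := by
      rw [PySem.List.pyGetD_natCast]
      exact getD_append_cons (pre0 ++ cur) rest c ' '
    rw [PySem.List.pyRange_one_cons (by push_cast [List.length_append, List.length_cons]; omega)]
    simp only [List.foldl_cons]
    by_cases hc : PySem.Chars.isalpha c = true
    · have hstep : cryptoStep (pre0 ++ cur ++ (c :: rest))
          (out, ((cur.length : Nat) : Int), ((pre0.length : Nat) : Int)) (((pre0 ++ cur).length : Nat) : Int)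
          = (out, ((cur.length : Nat) : Int) + 1, ((pre0.length : Nat) : Int)) := by
        simp only [cryptoStep, hget, hc, if_true]
      rw [hstep]
      have hcs : pre0 ++ cur ++ (c :: rest) = pre0 ++ (cur ++ [c]) ++ rest := by simp
      have hlo : (((pre0 ++ cur).length : Nat) : Int) + 1 = (((pre0 ++ (cur ++ [c])).length : Nat) : Int) := by
        push_cast [List.length_append, List.length_cons, List.length_nil]; ring
      have hcnt : ((cur.length : Nat) : Int) + 1 = (((cur ++ [c]).length : Nat) : Int) := by
        push_cast [List.length_append, List.length_cons, List.length_nil]; ring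
      rw [hcs, hlo, hcnt,
          ih pre0 (cur ++ [c]) out (by intro x hx; rcases List.mem_append.mp hx with h | h
                                       · exact hcur x h
                                       · simp at h; subst h; exact hc)]
      rw [emitP, if_pos hc]
    · have hslice : PySem.List.slice (pre0 ++ cur ++ (c :: rest))
          (some ((pre0.length : Nat) : Int)) (some (((pre0 ++ cur).length : Nat) : Int)) = cur := by
        rw [PySem.List.slice_natCast, List.append_assoc, List.drop_left,
            show (pre0 ++ cur).length - pre0.length = cur.length from by simp [List.length_append]]
        exact List.take_left
      have hstep : cryptoStep (pre0 ++ cur ++ (c :: rest))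
          (out, ((cur.length : Nat) : Int), ((pre0.length : Nat) : Int)) (((pre0 ++ cur).length : Nat) : Int)
          = (out ++ cur.map (shiftChar ((cur.length : Nat) : Int)) ++ [c], 0,
             (((pre0 ++ cur).length : Nat) : Int) + 1) := by
        simp only [cryptoStep, hget, hc, Bool.false_eq_true, if_false]
        rw [hslice, foldl_cryptoInner cur ((cur.length : Nat) : Int) out hcur]
      rw [hstep]
      have hcs : pre0 ++ cur ++ (c :: rest) = (pre0 ++ cur ++ [c]) ++ rest := by simp
      have hn : (((pre0 ++ cur).length : Nat) : Int) + 1 = (((pre0 ++ cur ++ [c]).length : Nat) : Int) := by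
        push_cast [List.length_append, List.length_cons, List.length_nil]; ring
      rw [hcs, hn]
      have ih' := ih (pre0 ++ cur ++ [c]) [] (out ++ cur.map (shiftChar ((cur.length : Nat) : Int)) ++ [c])
            (by intro x hx; simp at hx)
      simp only [List.append_nil, List.length_nil, Nat.cast_zero] at ih'
      rw [ih']
      rw [emitP, if_neg hc]
      simp [shiftWord]

-- B's foldl parse = the recursive parseF
theorem foldl_parseStep (cs : List Char) : ∀ (ws : List (List Char)) (ds cur : List Char),
    cs.foldl parseStep (ws, ds, cur)
      = (ws ++ (parseF cur cs).1, ds ++ (parseF cur cs).2.1, (parseF cur cs).2.2) := by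
  induction cs with
  | nil => intro ws ds cur; simp [parseF]
  | cons c rest ih =>
    intro ws ds cur
    by_cases hc : PySem.Chars.isalpha c = true
    · simp only [List.foldl_cons, parseStep, hc, if_true, parseF, ih]
    · simp only [List.foldl_cons, parseStep, hc, Bool.false_eq_true, if_false, parseF, ih]
      simp

-- fused emission = word/delimiter emission of the parse
theorem emitP_eq_emitWD (cs : List Char) : ∀ (cur : List Char),
    emitP cur cs = emitWD (parseF cur cs).1 (parseF cur cs).2.1 := by
  induction cs with
  | nil => intro cur; simp [emitP, parseF, emitWD]
  | cons c rest ih =>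
    intro cur
    by_cases hc : PySem.Chars.isalpha c = true
    · rw [emitP, if_pos hc, parseF, if_pos hc, ih]
    · rw [emitP, if_neg hc, parseF, if_neg hc, ih, emitWD]

theorem parseF_length (cs : List Char) : ∀ (cur : List Char),
    (parseF cur cs).1.length = (parseF cur cs).2.1.length := by
  induction cs with
  | nil => intro cur; simp [parseF]
  | cons c rest ih =>
    intro cur
    by_cases hc : PySem.Chars.isalpha c = true
    · rw [parseF, if_pos hc]; exact ih _
    · rw [parseF, if_neg hc]; simp [ih]

theorem emitWD_ne_nil (w : List Char) (ws : List (List Char)) (d : Char) (ds : List Char) :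
    emitWD (w :: ws) (d :: ds) ≠ [] := by
  rw [emitWD]; simp

-- dropping the last character of the full emission = B's interposing join
theorem dropLast_emitWD : ∀ (ws : List (List Char)) (ds : List Char),
    ws.length = ds.length →
    (emitWD ws ds).dropLast = joinWords ds (ws.map shiftWord) := by
  intro ws
  induction ws with
  | nil =>
    intro ds h
    have : ds = [] := List.length_eq_zero_iff.mp (by simpa using h.symm)
    subst this; simp [emitWD, joinWords]
  | cons w ws' ih =>
    intro ds h
    match ds with
    | [] => simp at h
    | d :: ds' =>
      match ws', ds' with
      | [], ds' =>
        have : ds' = [] := List.length_eq_zero_iff.mp (by simpa using h.symm)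
        subst this
        rw [emitWD, emitWD]
        simp [joinWords]
      | w' :: ws'', ds' =>
        match ds' with
        | [] => simp at h
        | d' :: ds'' =>
          rw [emitWD]
          rw [List.dropLast_append_of_ne_nil (by simp),
              show (d :: emitWD (w' :: ws'') (d' :: ds'')).dropLast
                = d :: (emitWD (w' :: ws'') (d' :: ds'')).dropLast from
                List.dropLast_cons_of_ne_nil (emitWD_ne_nil _ _ _ _)]
          rw [ih (d' :: ds'') (by simpa using h)]
          simp [joinWords, List.zip_cons_cons]

-- ===== VERDICT (by name: the statement is the Claim_ definition above) =====
theorem crypto_spec : Claim_equal_crypto := by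
  intro s _
  unfold Spec_crypto crypto crypto_alt
  have h := crypto_inv s.toList [] [] []
  simp only [List.nil_append, List.length_nil, Nat.cast_zero] at h
  simp only [PySem.Str.len_eq]
  rw [h (by intro x hx; simp at hx)]
  rw [PySem.List.slice_to_neg_one]
  rw [foldl_parseStep s.toList [] [] []]
  simp only [List.nil_append]
  rw [emitP_eq_emitWD s.toList []]
  rw [dropLast_emitWD _ _ (parseF_length s.toList [])]
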